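-- pv_equiv track=rewrite | github.com/YonatanMyers/web_scraping | Util/utilFunctions.py | get_end_score
-- ===== SOURCE A (Python) =====
-- def get_end_score(sc):
--     state = 1
--     res_str = ''
--     for l in sc:
--         if l == r'(':
--             state = 0
--         if state != 0:
--             res_str += l
--         if l == r')':
--             state = 1
--     res_int = int(res_str)
--     return res_int
-- ===== SOURCE B (Python) =====
-- def get_end_score(sc):
--     # Span-skipping: jump over "(...)" groups with str.find instead of a per-char state flag.
--     out = []
--     rest = sc
--     while True:
--         i = rest.find('(')
--         if i == -1:
--             out.append(rest)
--             break
--         out.append(rest[:i])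
--         j = rest.find(')', i)
--         if j == -1:
--             break
--         rest = rest[j + 1:]
--     return int(''.join(out))
-- ===== Notes on version B (the rewrite author's own statement) =====
-- stated objective: alternative
-- what changed: Replaces A's per-character loop with a 0/1 state flag and growing result string by a span-skipping loop that uses str.find to locate '(' and the matching ')' and collects the kept substrings, joining them before int().
-- outside the precondition, e.g. on get_end_score('('): A raises ValueError, B raises ValueError; on get_end_score(')'): A raises ValueError, B raises ValueError
import Mathlib
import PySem

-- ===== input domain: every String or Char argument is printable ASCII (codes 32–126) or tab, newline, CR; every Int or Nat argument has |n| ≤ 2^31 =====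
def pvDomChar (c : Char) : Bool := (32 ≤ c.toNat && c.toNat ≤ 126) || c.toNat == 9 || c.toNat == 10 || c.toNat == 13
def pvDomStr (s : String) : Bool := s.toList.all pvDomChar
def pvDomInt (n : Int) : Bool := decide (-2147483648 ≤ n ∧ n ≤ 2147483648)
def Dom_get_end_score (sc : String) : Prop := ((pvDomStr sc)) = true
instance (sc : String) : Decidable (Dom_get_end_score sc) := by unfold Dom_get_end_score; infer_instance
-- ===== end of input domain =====

-- B replaces A's per-character state flag by span-skipping over "(…)" groups with str.find
-- (objective: alternative decomposition, same linear cost); equality of return values is claimed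
-- on the inputs where Python A returns (Pre_ excludes exactly those where int() raises ValueError).

-- ===== PORT A =====
-- literal transliteration: for-loop with state ∈ {0,1} and growing res_str, then int(res_str)
def get_end_score (sc : String) : Int :=
  let fin := sc.toList.foldl (fun (st : Int × List Char) (l : Char) =>
      let state := if l = '(' then 0 else st.1
      let res := if state ≠ 0 then st.2 ++ [l] else st.2
      let state := if l = ')' then 1 else state
      (state, res)) (1, [])
  (PySem.Int.ofChars? fin.2).getD 0

-- ===== PORT B =====
-- transliteration of Source B's while-loop: rest shrinks past each "(…)" span located with find
def pvGoB (rest : List Char) : List (List Char) :=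
  let i := PySem.Chars.find rest ['(']
  if _hi : i = -1 then [rest]
  else
    let piece := PySem.List.slice rest none (some i)
    let j := PySem.Chars.findFrom rest [')'] i
    if _hj : j = -1 then [piece]
    else piece :: pvGoB (PySem.List.slice rest (some (j + 1)) none)
termination_by rest.length
decreasing_by
  have h0 : (0:Int) ≤ PySem.Chars.find rest ['('] := by
    have := PySem.Chars.neg_one_le_find rest ['(']
    rcases lt_or_eq_of_le this with h | h
    · omega
    · exact absurd h.symm _hi
  have hpre := (PySem.Chars.find_spec h0).1
  have hne : rest ≠ [] := by
    intro h; rw [h] at hpre; simp at hpre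
  have hk : (PySem.Chars.find rest ['(']).toNat ≤ rest.length := by
    have := PySem.Chars.find_le_length rest ['(']
    omega
  have hcast : ((PySem.Chars.find rest ['(']).toNat : Int) = PySem.Chars.find rest ['('] :=
    Int.toNat_of_nonneg h0
  have hspec := PySem.Chars.findFrom_natCast_spec rest [')'] _ hk (by rw [hcast]; exact _hj)
  have hj0 : (0:Int) ≤ PySem.Chars.findFrom rest [')'] (PySem.Chars.find rest ['(']) := by
    rw [← hcast]; have := hspec.1; omega
  rw [PySem.List.slice_from _ (by omega)]
  have hlen : 0 < rest.length := List.length_pos_iff.mpr hne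
  simp only [List.length_drop]
  omega

def get_end_score_alt (sc : String) : Int :=
  (PySem.Int.ofChars? (PySem.Chars.join [] (pvGoB sc.toList))).getD 0

-- ===== PRECONDITION & SPEC =====
-- specification helper (used only to STATE Pre_): the parenthesis-stripped character list
-- (pvStripGo true = outside parens, pvStripGo false = inside, skipping to the next ')')
def pvStripGo : Bool → List Char → List Char
  | _, [] => []
  | true, c :: rest => if c = '(' then pvStripGo false rest else c :: pvStripGo true rest
  | false, c :: rest => if c = ')' then pvStripGo true rest else pvStripGo false rest

def pvStrip (l : List Char) : List Char := pvStripGo true l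

-- Pre_ excludes exactly the inputs where Python's int() raises ValueError on the stripped string
def Pre_get_end_score (sc : String) : Prop :=
  (PySem.Int.ofChars? (pvStrip sc.toList)).isSome = true
instance (sc : String) : Decidable (Pre_get_end_score sc) := by
  unfold Pre_get_end_score; infer_instance

def pvWitness_get_end_score : String := "12(ab)3"

def Spec_get_end_score (sc : String) (out : Int) : Prop := out = get_end_score_alt sc
instance (sc : String) (out : Int) : Decidable (Spec_get_end_score sc out) := by
  unfold Spec_get_end_score; infer_instance

-- ===== CLAIM (what is proved, stated in full; the proofs are below) =====
def Claim_equal_get_end_score : Prop :=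
  ∀ (sc : String), Dom_get_end_score sc → Pre_get_end_score sc →
    Spec_get_end_score sc (get_end_score sc)

-- ===== LEMMAS AND PROOFS =====

-- the state-0 continuation of pvStrip: skip to just past the next ')', then resume
def pvSkip (l : List Char) : List Char := pvStripGo false l

lemma pvStrip_nil : pvStrip [] = [] := rfl

lemma pvStrip_cons_paren (rest : List Char) : pvStrip ('(' :: rest) = pvSkip rest := by
  simp [pvStrip, pvSkip, pvStripGo]

lemma pvStrip_cons_other (c : Char) (rest : List Char) (h : c ≠ '(') :
    pvStrip (c :: rest) = c :: pvStrip rest := by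
  simp [pvStrip, pvStripGo, h]

lemma pvSkip_cons_close (rest : List Char) : pvSkip (')' :: rest) = pvStrip rest := by
  simp [pvStrip, pvSkip, pvStripGo]

lemma pvSkip_cons_other (c : Char) (rest : List Char) (h : c ≠ ')') :
    pvSkip (c :: rest) = pvSkip rest := by
  simp [pvSkip, pvStripGo, h]

-- ---- A-side characterisation: the fold computes pvSkip / pvStrip according to the state flag
lemma foldA_char (l : List Char) : ∀ acc : List Char,
    ((l.foldl (fun (st : Int × List Char) (l : Char) =>
      let state := if l = '(' then 0 else st.1
      let res := if state ≠ 0 then st.2 ++ [l] else st.2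
      let state := if l = ')' then 1 else state
      (state, res)) (0, acc)).2 = acc ++ pvSkip l) ∧
    ((l.foldl (fun (st : Int × List Char) (l : Char) =>
      let state := if l = '(' then 0 else st.1
      let res := if state ≠ 0 then st.2 ++ [l] else st.2
      let state := if l = ')' then 1 else state
      (state, res)) (1, acc)).2 = acc ++ pvStrip l) := by
  induction l with
  | nil => intro acc; simp [pvSkip, pvStrip, pvStripGo]
  | cons c rest ih =>
    intro acc
    by_cases hp : c = '('
    · subst hp
      constructor
      · simpa [List.foldl_cons, pvSkip_cons_other '(' rest (by decide)] using (ih acc).1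
      · simpa [List.foldl_cons, pvStrip_cons_paren] using (ih acc).1
    · by_cases hc : c = ')'
      · subst hc
        constructor
        · simpa [List.foldl_cons, hp, pvSkip_cons_close] using (ih acc).2
        · simpa [List.foldl_cons, hp, pvStrip_cons_other ')' rest hp,
            List.append_assoc] using (ih (acc ++ [')'])).2
      · constructor
        · simpa [List.foldl_cons, hp, hc, pvSkip_cons_other c rest hc] using (ih acc).1
        · simpa [List.foldl_cons, hp, hc, pvStrip_cons_other c rest hp,
            List.append_assoc] using (ih (acc ++ [c])).2

-- ---- decomposition facts about pvStrip / pvSkip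
lemma pvStrip_no_paren (l : List Char) (h : '(' ∉ l) : pvStrip l = l := by
  induction l with
  | nil => exact pvStrip_nil
  | cons c rest ih =>
    have hc : c ≠ '(' := fun hcc => h (hcc ▸ List.mem_cons_self)
    rw [pvStrip_cons_other c rest hc, ih (fun hm => h (List.mem_cons_of_mem _ hm))]

lemma pvStrip_append_paren (u v : List Char) (h : '(' ∉ u) :
    pvStrip (u ++ '(' :: v) = u ++ pvSkip v := by
  induction u with
  | nil => simpa using pvStrip_cons_paren v
  | cons c rest ih =>
    have hc : c ≠ '(' := fun hcc => h (hcc ▸ List.mem_cons_self)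
    simp only [List.cons_append, pvStrip_cons_other c _ hc,
      ih (fun hm => h (List.mem_cons_of_mem _ hm))]

lemma pvSkip_no_close (v : List Char) (h : ')' ∉ v) : pvSkip v = [] := by
  induction v with
  | nil => rfl
  | cons c rest ih =>
    have hc : c ≠ ')' := fun hcc => h (hcc ▸ List.mem_cons_self)
    rw [pvSkip_cons_other c rest hc, ih (fun hm => h (List.mem_cons_of_mem _ hm))]

lemma pvSkip_append_close (u w : List Char) (h : ∀ c ∈ u, c ≠ ')') :
    pvSkip (u ++ ')' :: w) = pvStrip w := by
  induction u with
  | nil => simpa using pvSkip_cons_close w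
  | cons c rest ih =>
    have hc : c ≠ ')' := h c List.mem_cons_self
    rw [List.cons_append, pvSkip_cons_other c _ hc,
      ih (fun x hx => h x (List.mem_cons_of_mem _ hx))]

-- ---- bridges between find-style facts and list decompositions
lemma singleton_prefix_drop {c : Char} {l : List Char} {n : Nat}
    (h : [c] <+: l.drop n) : n < l.length ∧ l.drop n = c :: l.drop (n + 1) := by
  obtain ⟨t, ht⟩ := h
  have hne : l.drop n ≠ [] := by rw [← ht]; simp
  have hn : n < l.length := by
    by_contra hge
    exact hne (List.drop_eq_nil_of_le (by omega))
  refine ⟨hn, ?_⟩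
  rw [List.drop_eq_getElem_cons hn] at ht ⊢
  simp only [List.cons_append, List.cons.injEq] at ht
  rw [ht.1]

lemma mem_take_prefix_drop {c : Char} {l : List Char} {n : Nat}
    (h : c ∈ l.take n) : ∃ k, k < n ∧ [c] <+: l.drop k := by
  obtain ⟨k, hk, hget⟩ := List.mem_iff_getElem.mp h
  have hk2 : k < n ∧ k < l.length := by
    have := hk; simp [List.length_take] at this; omega
  refine ⟨k, hk2.1, ?_⟩
  rw [List.drop_eq_getElem_cons hk2.2]
  have hg : l[k] = c := by rw [← hget]; simp [List.getElem_take]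
  exact hg ▸ ⟨_, rfl⟩

-- join with the empty separator is flatten
lemma join_nil_eq_flatten (ps : List (List Char)) : PySem.Chars.join [] ps = ps.flatten := by
  induction ps with
  | nil => simp [PySem.Chars.join_nil]
  | cons p rest ih =>
    cases rest with
    | nil => simp [PySem.Chars.join, List.intercalate]
    | cons q r => rw [PySem.Chars.join_cons_cons, ih]; simp

-- ---- B-side characterisation: the flattened pieces are pvStrip
lemma goB_flatten (rest : List Char) : (pvGoB rest).flatten = pvStrip rest := by
  induction rest using pvGoB.induct with
  | case1 rest i hi =>
    rw [pvGoB, dif_pos hi]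
    simp only [List.flatten_cons, List.flatten_nil, List.append_nil]
    have hnp : '(' ∉ rest := fun hm =>
      (PySem.Chars.find_eq_neg_one_iff rest ['(']).mp hi
        ((List.singleton_infix_iff '(' rest).mpr hm)
    rw [pvStrip_no_paren rest hnp]
  | case2 rest i hi j hj =>
    have h0 : (0:Int) ≤ i := by
      have := PySem.Chars.neg_one_le_find rest ['(']
      rcases lt_or_eq_of_le this with h | h
      · exact by omega
      · exact absurd h.symm hi
    have hpre := PySem.Chars.find_spec (s := rest) (sub := ['(']) h0
    obtain ⟨hn, hdropn⟩ := singleton_prefix_drop hpre.1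
    have hcast : ((i.toNat : Int)) = i := Int.toNat_of_nonneg h0
    have hnc : ¬ [')'] <:+: rest.drop i.toNat :=
      (PySem.Chars.findFrom_natCast_eq_neg_one_iff rest [')'] i.toNat (le_of_lt hn)).mp
        (by rw [hcast]; exact hj)
    have hnc2 : ')' ∉ rest.drop (i.toNat + 1) := fun hm => hnc
      ((List.singleton_infix_iff ')' _).mpr (hdropn ▸ List.mem_cons_of_mem _ hm))
    have hnp : '(' ∉ rest.take i.toNat := by
      intro hm
      obtain ⟨k, hk, hpk⟩ := mem_take_prefix_drop hm
      exact hpre.2 k hk hpk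
    have hstrip : pvStrip rest = rest.take i.toNat ++ pvSkip (rest.drop (i.toNat + 1)) := by
      conv_lhs => rw [← List.take_append_drop i.toNat rest, hdropn]
      exact pvStrip_append_paren _ _ hnp
    have h0' : (0:Int) ≤ PySem.Chars.find rest ['('] := h0
    rw [pvGoB, dif_neg hi, dif_pos hj, hstrip, pvSkip_no_close _ hnc2]
    simp only [List.flatten_cons, List.flatten_nil, List.append_nil]
    exact PySem.List.slice_to rest h0'
  | case3 rest i hi j hj ih =>
    have h0 : (0:Int) ≤ i := by
      have := PySem.Chars.neg_one_le_find rest ['(']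
      rcases lt_or_eq_of_le this with h | h
      · exact by omega
      · exact absurd h.symm hi
    have hpre := PySem.Chars.find_spec (s := rest) (sub := ['(']) h0
    obtain ⟨hn, hdropn⟩ := singleton_prefix_drop hpre.1
    have hcast : ((i.toNat : Int)) = i := Int.toNat_of_nonneg h0
    have hji : PySem.Chars.findFrom rest [')'] (i.toNat : Int) = j := by rw [hcast]
    have hspec := PySem.Chars.findFrom_natCast_spec rest [')'] i.toNat (le_of_lt hn)
      (by rw [hji]; exact hj)
    rw [hji] at hspec
    have hj0 : (0:Int) ≤ j := le_trans (by omega) hspec.1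
    obtain ⟨hmlt, hdropm⟩ := singleton_prefix_drop hspec.2.1
    have hnm : i.toNat < j.toNat := by
      have hle : i.toNat ≤ j.toNat := by
        have := hspec.1; omega
      rcases lt_or_eq_of_le hle with h | h
      · exact h
      · exfalso
        rw [← h] at hdropm
        rw [hdropn] at hdropm
        simp only [List.cons.injEq] at hdropm
        exact absurd hdropm.1 (by decide)
    have hdd : (rest.drop (i.toNat + 1)).drop (j.toNat - (i.toNat + 1)) = rest.drop j.toNat := by
      rw [List.drop_drop]; congr 1; omega
    have hv : rest.drop (i.toNat + 1) =
        (rest.drop (i.toNat + 1)).take (j.toNat - (i.toNat + 1)) ++ ')' :: rest.drop (j.toNat + 1) := by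
      conv_lhs => rw [← List.take_append_drop (j.toNat - (i.toNat + 1)) (rest.drop (i.toNat + 1))]
      rw [hdd, hdropm]
    have hu : ∀ c ∈ (rest.drop (i.toNat + 1)).take (j.toNat - (i.toNat + 1)), c ≠ ')' := by
      intro c hc hc'
      subst hc'
      obtain ⟨k, hk, hpk⟩ := mem_take_prefix_drop hc
      rw [List.drop_drop] at hpk
      exact hspec.2.2 (i.toNat + 1 + k) (by omega) (by omega) hpk
    have hnp : '(' ∉ rest.take i.toNat := by
      intro hm
      obtain ⟨k, hk, hpk⟩ := mem_take_prefix_drop hm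
      exact hpre.2 k hk hpk
    have hstrip : pvStrip rest = rest.take i.toNat ++ pvStrip (rest.drop (j.toNat + 1)) := by
      conv_lhs => rw [← List.take_append_drop i.toNat rest, hdropn]
      rw [pvStrip_append_paren _ _ hnp]
      conv_lhs => rw [hv]
      rw [pvSkip_append_close _ _ hu]
    have hslice : PySem.List.slice rest (some (j + 1)) none = rest.drop (j.toNat + 1) := by
      rw [PySem.List.slice_from _ (by omega)]
      congr 1
      omega
    rw [hslice] at ih
    have h0' : (0:Int) ≤ PySem.Chars.find rest ['('] := h0
    rw [pvGoB, dif_neg hi, dif_neg hj, hslice]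
    rw [List.flatten_cons, ih, hstrip, PySem.List.slice_to rest h0']

-- ===== VERDICT (by name: the statement is the Claim_ definition above) =====
theorem get_end_score_spec : Claim_equal_get_end_score := by
  intro sc _ _
  have h := (foldA_char sc.toList []).2
  simp only [List.nil_append] at h
  unfold Spec_get_end_score
  simp only [get_end_score, get_end_score_alt, join_nil_eq_flatten, goB_flatten, h]
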